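-- pv_equiv track=rewrite | github.com/sammacorpy/file_grouping_k_means | proj.py | weightmat
-- ===== SOURCE A (Python) =====
-- def weightmat(filea,fileb):
--     c=""
--     weight=0
--     for i in filea:
--         c+=i
--         if c in fileb:
--             weight+=1
--         else:
--             return weight
--     return weight
-- ===== SOURCE B (Python) =====
-- def weightmat(filea, fileb):
--     # binary search on prefix length: containment of filea[:k] in fileb is
--     # monotone in k, so the answer is the largest k with filea[:k] in fileb
--     lo, hi = 0, len(filea)
--     while lo < hi:
--         mid = (lo + hi + 1) // 2
--         if filea[:mid] in fileb:
--             lo = mid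
--         else:
--             hi = mid - 1
--     return lo
-- ===== Notes on version B (the rewrite author's own statement) =====
-- stated objective: faster
-- what changed: Replaces the incremental char-by-char loop (one substring test per prefix length) by a binary search on the prefix length, exploiting that containment of a prefix is monotone, so only O(log n) substring tests are made.
import Mathlib
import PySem

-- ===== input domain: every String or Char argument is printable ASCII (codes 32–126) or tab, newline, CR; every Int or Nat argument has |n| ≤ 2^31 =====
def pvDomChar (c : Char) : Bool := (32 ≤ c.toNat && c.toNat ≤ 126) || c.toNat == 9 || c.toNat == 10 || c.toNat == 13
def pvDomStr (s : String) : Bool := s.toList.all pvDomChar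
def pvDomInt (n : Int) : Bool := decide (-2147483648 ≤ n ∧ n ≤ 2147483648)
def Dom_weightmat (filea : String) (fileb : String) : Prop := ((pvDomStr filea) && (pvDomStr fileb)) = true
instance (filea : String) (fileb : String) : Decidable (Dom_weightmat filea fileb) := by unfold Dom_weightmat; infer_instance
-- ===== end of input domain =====

-- B replaces A's char-by-char loop (one substring test per prefix length) with a
-- binary search on the prefix length (containment of a prefix in fileb is monotone),
-- so it performs only O(log n) substring tests instead of up to n.

-- ===== PORT A =====
-- A's loop: grow c one character at a time, count while `c in fileb`, stop at first miss.
def weightmatGo (cb : List Char) (c : List Char) (weight : Int) : List Char → Int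
  | [] => weight
  | i :: rest =>
    let c' := c ++ [i]
    if PySem.Chars.isIn c' cb then weightmatGo cb c' (weight + 1) rest
    else weight

def weightmat (filea : String) (fileb : String) : Int :=
  weightmatGo fileb.toList [] 0 filea.toList

-- ===== PORT B =====
-- B's loop: binary search for the largest k with filea[:k] in fileb.
def weightmatAltGo (ca : List Char) (cb : List Char) (lo hi : Nat) : Nat :=
  if h : lo < hi then
    if PySem.Chars.isIn (ca.take ((lo + hi + 1) / 2)) cb then
      weightmatAltGo ca cb ((lo + hi + 1) / 2) hi
    else
      weightmatAltGo ca cb lo ((lo + hi + 1) / 2 - 1)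
  else lo
termination_by hi - lo
decreasing_by all_goals omega

def weightmat_alt (filea : String) (fileb : String) : Int :=
  (weightmatAltGo filea.toList fileb.toList 0 filea.toList.length : Int)

-- ===== PRECONDITION & SPEC =====
def Spec_weightmat (filea : String) (fileb : String) (out : Int) : Prop := out = weightmat_alt filea fileb
instance (filea : String) (fileb : String) (out : Int) : Decidable (Spec_weightmat filea fileb out) := by unfold Spec_weightmat; infer_instance

-- ===== CLAIM (what is proved, stated in full; the proofs are below) =====
def Claim_equal_weightmat : Prop := ∀ (filea : String) (fileb : String), Dom_weightmat filea fileb → Spec_weightmat filea fileb (weightmat filea fileb)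

-- ===== LEMMAS AND PROOFS =====

-- Containment of prefixes of ca in cb is monotone (downward) in the prefix length.
theorem pv_mono (ca cb : List Char) {j k : Nat} (hjk : j ≤ k)
    (hk : PySem.Chars.isIn (ca.take k) cb = true) :
    PySem.Chars.isIn (ca.take j) cb = true := by
  rw [PySem.Chars.isIn_iff_infix] at hk ⊢
  have hpre : ca.take j <+: ca.take k := by
    have : (ca.take k).take j = ca.take j := by
      rw [List.take_take, Nat.min_eq_left hjk]
    rw [← this]; exact List.take_prefix _ _
  exact List.IsInfix.trans hpre.isInfix hk

-- A's loop, started at position i with matching prefix, returns w + (r - i) for the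
-- maximal r reached: P r holds and either r = n or P (r+1) fails.
theorem pv_aloop (ca cb : List Char) :
    ∀ (d i : Nat), ca.length - i ≤ d → i ≤ ca.length →
    PySem.Chars.isIn (ca.take i) cb = true →
    ∃ r : Nat, i ≤ r ∧ r ≤ ca.length ∧ PySem.Chars.isIn (ca.take r) cb = true ∧
      (r = ca.length ∨ PySem.Chars.isIn (ca.take (r + 1)) cb = false) ∧
      ∀ w : Int, weightmatGo cb (ca.take i) w (ca.drop i) = w + ((r - i : Nat) : Int) := by
  intro d
  induction d with
  | zero =>
    intro i hd hi hP
    have hin : i = ca.length := by omega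
    refine ⟨ca.length, by omega, le_refl _, by rw [← hin]; exact hP, Or.inl rfl, ?_⟩
    intro w
    subst hin
    simp [weightmatGo, List.drop_length]
  | succ d ih =>
    intro i hd hi hP
    by_cases hlt : i < ca.length
    · have hdrop : ca.drop i = ca[i] :: ca.drop (i + 1) := List.drop_eq_getElem_cons hlt
      have htake : ca.take i ++ [ca[i]] = ca.take (i + 1) := by
        rw [List.take_add_one]
        simp [List.getElem?_eq_getElem hlt]
      by_cases hP1 : PySem.Chars.isIn (ca.take (i + 1)) cb = true
      · obtain ⟨r, hir, hrn, hPr, hstop, hval⟩ := ih (i + 1) (by omega) (by omega) hP1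
        refine ⟨r, by omega, hrn, hPr, hstop, ?_⟩
        intro w
        rw [hdrop]
        simp only [weightmatGo, htake, hP1, if_true]
        rw [hval (w + 1)]
        omega
      · refine ⟨i, le_refl _, by omega, hP, Or.inr (by simpa using hP1), ?_⟩
        intro w
        rw [hdrop]
        simp only [weightmatGo, htake]
        rw [if_neg (by simpa using hP1)]
        simp
    · have hin : i = ca.length := by omega
      refine ⟨ca.length, by omega, le_refl _, by rw [← hin]; exact hP, Or.inl rfl, ?_⟩
      intro w
      subst hin
      simp [weightmatGo, List.drop_length]

-- B's binary search returns the largest k ≤ n with P k, given the loop invariant.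
theorem pv_bloop (ca cb : List Char) :
    ∀ (d lo hi : Nat), hi - lo ≤ d →
    PySem.Chars.isIn (ca.take lo) cb = true → lo ≤ hi → hi ≤ ca.length →
    (∀ k, k ≤ ca.length → PySem.Chars.isIn (ca.take k) cb = true → k ≤ hi) →
    PySem.Chars.isIn (ca.take (weightmatAltGo ca cb lo hi)) cb = true ∧
      weightmatAltGo ca cb lo hi ≤ ca.length ∧
      ∀ k, k ≤ ca.length → PySem.Chars.isIn (ca.take k) cb = true →
        k ≤ weightmatAltGo ca cb lo hi := by
  intro d
  induction d with
  | zero =>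
    intro lo hi hd hP hlohi hhin hub
    have : lo = hi := by omega
    subst this
    rw [weightmatAltGo, dif_neg (by omega)]
    exact ⟨hP, by omega, hub⟩
  | succ d ih =>
    intro lo hi hd hP hlohi hhin hub
    by_cases h : lo < hi
    · rw [weightmatAltGo, dif_pos h]
      by_cases hm : PySem.Chars.isIn (ca.take ((lo + hi + 1) / 2)) cb = true
      · rw [if_pos hm]
        exact ih ((lo + hi + 1) / 2) hi (by omega) hm (by omega) hhin hub
      · rw [if_neg hm]
        refine ih lo ((lo + hi + 1) / 2 - 1) (by omega) hP (by omega) (by omega) ?_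
        intro k hk hPk
        by_contra hgt
        exact hm (pv_mono ca cb (by omega) hPk)
    · have : lo = hi := by omega
      subst this
      rw [weightmatAltGo, dif_neg (by omega)]
      exact ⟨hP, by omega, hub⟩

-- ===== VERDICT (by name: the statement is the Claim_ definition above) =====
theorem weightmat_spec : Claim_equal_weightmat := by
  intro filea fileb _
  unfold Spec_weightmat weightmat weightmat_alt
  set ca := filea.toList with hca
  set cb := fileb.toList with hcb
  have hP0 : PySem.Chars.isIn (ca.take 0) cb = true := by
    simp [PySem.Chars.isIn_nil]
  obtain ⟨r, _, hrn, hPr, hstop, hval⟩ :=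
    pv_aloop ca cb ca.length 0 (by omega) (by omega) hP0
  obtain ⟨hPb, hbn, hbmax⟩ :=
    pv_bloop ca cb ca.length 0 ca.length (by omega) hP0 (by omega) (le_refl _)
      (fun k hk _ => hk)
  have h1 : weightmatGo cb [] 0 ca = 0 + ((r : Nat) : Int) := by
    have := hval 0
    simpa using this
  have hble : weightmatAltGo ca cb 0 ca.length ≤ r := by
    rcases hstop with hEq | hFalse
    · omega
    · by_contra hgt
      have : PySem.Chars.isIn (ca.take (r + 1)) cb = true :=
        pv_mono ca cb (by omega) hPb
      rw [hFalse] at this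
      exact absurd this (by simp)
  have hrle : r ≤ weightmatAltGo ca cb 0 ca.length := hbmax r hrn hPr
  have : weightmatAltGo ca cb 0 ca.length = r := by omega
  rw [h1, this]
  omega
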